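-- pv_equiv track=rewrite | github.com/MrGallo/advent-of-code-solutions | 2019/Day 04/day_04.py | has_at_most_2_adjacent
-- ===== SOURCE A (Python) =====
-- from typing import List
--
-- def has_at_most_2_adjacent(digits: List[int]) -> bool:
--     """For Part 2"""
--     adjacent = [digits[0]]
--     for num in digits[1:]:
--         if adjacent[0] == num:
--             adjacent.append(num)
--         else:
--             if len(adjacent) == 2:
--                 return True
--             adjacent = [num]
--
--     return len(adjacent) == 2
-- ===== SOURCE B (Python) =====
-- def has_at_most_2_adjacent(digits):
--     """For Part 2"""
--     runs = []
--     prev = None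
--     for num in digits:
--         if runs and prev == num:
--             runs[-1] += 1
--         else:
--             runs.append(1)
--             prev = num
--     return 2 in runs
-- ===== Notes on version B (the rewrite author's own statement) =====
-- stated objective: idiomatic
-- what changed: B builds the full list of consecutive run lengths in one pass and then asks whether 2 occurs in it, replacing A's single-run accumulator list with early return.
import Mathlib
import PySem

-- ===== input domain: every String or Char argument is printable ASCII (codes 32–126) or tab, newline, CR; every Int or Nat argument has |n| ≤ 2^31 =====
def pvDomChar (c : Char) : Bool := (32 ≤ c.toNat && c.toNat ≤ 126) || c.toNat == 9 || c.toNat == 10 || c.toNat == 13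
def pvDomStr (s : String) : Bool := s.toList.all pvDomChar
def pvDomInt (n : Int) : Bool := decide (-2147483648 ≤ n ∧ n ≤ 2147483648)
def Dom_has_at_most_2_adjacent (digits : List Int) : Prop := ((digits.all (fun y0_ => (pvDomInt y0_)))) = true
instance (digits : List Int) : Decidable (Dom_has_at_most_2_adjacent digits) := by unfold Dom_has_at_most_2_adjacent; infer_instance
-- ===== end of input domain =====

-- ===== PORT A =====
-- B builds all consecutive run lengths then scans for 2; same cost, plainer decomposition. Pre_ excludes only the empty list, on which A raises IndexError.
-- A's loop: 'adjacent' holds the current run; early return True when a run of length 2 closes.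
def pvALoop (adjacent : List Int) : List Int → Bool
  | [] => adjacent.length == 2
  | num :: rest =>
    if adjacent.headD 0 == num then pvALoop (adjacent ++ [num]) rest
    else if adjacent.length == 2 then true
    else pvALoop [num] rest

def has_at_most_2_adjacent (digits : List Int) : Bool :=
  match digits with
  | [] => false   -- digits[0] raises IndexError in Python; excluded by Pre_
  | d :: rest => pvALoop [d] rest

-- ===== PORT B =====
-- runs[-1] += 1
def pvBumpLast : List Int → List Int
  | [] => []
  | [x] => [x + 1]
  | x :: xs => x :: pvBumpLast xs

def pvBLoop (runs : List Int) (prev : Option Int) : List Int → List Int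
  | [] => runs
  | num :: rest =>
    if runs ≠ [] ∧ prev = some num then pvBLoop (pvBumpLast runs) prev rest
    else pvBLoop (runs ++ [1]) (some num) rest

def has_at_most_2_adjacent_alt (digits : List Int) : Bool :=
  (pvBLoop [] none digits).contains 2

-- ===== PRECONDITION & SPEC =====
-- Pre_ excludes exactly the empty list, on which A raises IndexError (digits[0]).
def Pre_has_at_most_2_adjacent (digits : List Int) : Prop := digits ≠ []
instance (digits : List Int) : Decidable (Pre_has_at_most_2_adjacent digits) := by unfold Pre_has_at_most_2_adjacent; infer_instance
def pvWitness_has_at_most_2_adjacent : List Int := [1, 1, 2]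

def Spec_has_at_most_2_adjacent (digits : List Int) (out : Bool) : Prop := out = has_at_most_2_adjacent_alt digits
instance (digits : List Int) (out : Bool) : Decidable (Spec_has_at_most_2_adjacent digits out) := by unfold Spec_has_at_most_2_adjacent; infer_instance

-- ===== CLAIM (what is proved, stated in full; the proofs are below) =====
def Claim_equal_has_at_most_2_adjacent : Prop := ∀ (digits : List Int), Dom_has_at_most_2_adjacent digits → Pre_has_at_most_2_adjacent digits → Spec_has_at_most_2_adjacent digits (has_at_most_2_adjacent digits)

-- ===== LEMMAS AND PROOFS =====
-- Common reference loop: current run has length c (≥ 1) with value prev.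
def pvGo (c : Int) (prev : Int) : List Int → Bool
  | [] => c == 2
  | num :: rest =>
    if prev == num then pvGo (c + 1) prev rest
    else if c == 2 then true
    else pvGo 1 num rest

theorem pvALoop_eq_go (rest : List Int) : ∀ (c : Nat) (prev : Int),
    pvALoop (prev :: List.replicate c prev) rest = pvGo (c + 1) prev rest := by
  induction rest with
  | nil =>
    intro c prev
    simp [pvALoop, pvGo]
    omega
  | cons num rest ih =>
    intro c prev
    by_cases h : prev = num
    · subst h
      have : (prev :: List.replicate c prev) ++ [prev] = prev :: List.replicate (c + 1) prev := by
        simp [List.replicate_succ' (n := c)]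
      simp only [pvALoop, pvGo, List.headD, beq_self_eq_true, this, ih]
      push_cast; ring_nf
    · have hb : (prev == num) = false := by simp [h]
      have hbase := ih 0 num
      simp only [List.replicate_zero, Nat.cast_zero, zero_add] at hbase
      by_cases hc : c = 1
      · subst hc
        simp [pvALoop, pvGo, hb]
      · simp [pvALoop, pvGo, hb, hbase, beq_eq_decide]
        rw [decide_eq_false hc, decide_eq_false (by omega)]

theorem pvBumpLast_append (rs : List Int) (c : Int) : pvBumpLast (rs ++ [c]) = rs ++ [c + 1] := by
  induction rs with
  | nil => simp [pvBumpLast]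
  | cons x xs ih =>
    cases xs with
    | nil => simp [pvBumpLast]
    | cons y ys =>
      have hstep : pvBumpLast (x :: y :: (ys ++ [c])) = x :: pvBumpLast (y :: (ys ++ [c])) := rfl
      simp only [List.cons_append] at ih ⊢
      rw [hstep, ih]

theorem pvBLoop_eq_go (rest : List Int) : ∀ (rs : List Int) (c prev : Int),
    (pvBLoop (rs ++ [c]) (some prev) rest).contains 2 = (rs.contains 2 || pvGo c prev rest) := by
  induction rest with
  | nil => intro rs c prev; simp [pvBLoop, pvGo, beq_eq_decide, eq_comm]
  | cons num rest ih =>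
    intro rs c prev
    by_cases h : prev = num
    · subst h
      rw [pvBLoop, if_pos (by simp), pvBumpLast_append, ih, pvGo, if_pos (by simp)]
    · rw [pvBLoop, if_neg (by simp [h]), show (rs ++ [c]) ++ [1] = (rs ++ [c]) ++ [(1:Int)] from rfl, ih]
      rw [pvGo, if_neg (by simp [h])]
      by_cases h2 : c = 2
      · simp [h2]
      · simp [h2, beq_eq_decide, eq_comm]

-- ===== VERDICT (by name: the statement is the Claim_ definition above) =====
theorem has_at_most_2_adjacent_spec : Claim_equal_has_at_most_2_adjacent := by
  intro digits _ hpre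
  unfold Spec_has_at_most_2_adjacent
  match digits with
  | [] => exact absurd rfl hpre
  | d :: rest =>
    show pvALoop [d] rest = (pvBLoop [] none (d :: rest)).contains 2
    rw [pvBLoop, if_neg (by simp)]
    rw [show ([] : List Int) ++ [1] = [] ++ [(1:Int)] from rfl, pvBLoop_eq_go rest [] 1 d]
    have ha := pvALoop_eq_go rest 0 d
    simp only [List.replicate_zero, Nat.cast_zero, zero_add] at ha
    simp [ha]
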